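-- pv_equiv track=rewrite | github.com/viroovr/baekjoon | Platinum/Platinum IV/10266.py | get_possibility
-- ===== SOURCE A (Python) =====
-- def compute_lps(P):
--     N = len(P)
--     j = 0
--     lps = [0] * N
--     for i in range(1, N):
--         while j > 0 and P[i] != P[j]:
--             j = lps[j - 1]
--
--         if P[i] == P[j]:
--             j += 1
--             lps[i] = j
--
--     return lps
--
-- def get_possibility(N, c1, c2):
--     M = 360_000
--     c1.sort()
--     c2.sort()
--
--     diff1 = [(c1[i + 1] - c1[i] + M) % M for i in range(-1, N - 1)]
--     diff2 = [(c2[i + 1] - c2[i] + M) % M for i in range(-1, N - 1)]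
--
--     T = diff1 + diff1
--     P = diff2
--     lps = compute_lps(P)
--
--     lengthT = len(T)
--     lengthP = len(P)
--     j = 0
--     for i in range(lengthT):
--         while j > 0 and T[i] != P[j]:
--             j = lps[j - 1]
--         if T[i] == P[j]:
--             j += 1
--         if j == lengthP:
--             return "possible"
--
--     return "impossible"
-- ===== SOURCE B (Python) =====
-- def get_possibility(N, c1, c2):
--     M = 360_000
--     c1.sort()
--     c2.sort()
--
--     diff1 = [(c1[i + 1] - c1[i] + M) % M for i in range(-1, N - 1)]
--     diff2 = [(c2[i + 1] - c2[i] + M) % M for i in range(-1, N - 1)]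
--
--     for s in range(N):
--         if all(diff2[i] == diff1[(i + s) % N] for i in range(N)):
--             return "possible"
--     return "impossible"
-- ===== Notes on version B (the rewrite author's own statement) =====
-- stated objective: simpler
-- what changed: Replaced the KMP pattern search (LPS table plus linear scan over diff1+diff1) by a direct quadratic test of every cyclic shift of the difference array; preprocessing (in-place sorts and the wrap-around diff lists) is unchanged.
import Mathlib
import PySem

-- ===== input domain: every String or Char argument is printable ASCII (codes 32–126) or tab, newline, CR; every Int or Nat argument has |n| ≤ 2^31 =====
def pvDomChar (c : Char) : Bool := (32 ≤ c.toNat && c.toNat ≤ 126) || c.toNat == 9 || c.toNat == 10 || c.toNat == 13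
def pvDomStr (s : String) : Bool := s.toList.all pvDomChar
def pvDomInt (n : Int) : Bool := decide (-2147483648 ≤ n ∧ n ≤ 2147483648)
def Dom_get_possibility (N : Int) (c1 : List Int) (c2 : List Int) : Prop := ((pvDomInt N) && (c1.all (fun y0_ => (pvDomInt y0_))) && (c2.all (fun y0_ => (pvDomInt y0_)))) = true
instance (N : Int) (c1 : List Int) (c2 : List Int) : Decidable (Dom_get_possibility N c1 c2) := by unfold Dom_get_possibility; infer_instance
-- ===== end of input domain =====

-- B replaces A's KMP search by a direct quadratic cyclic-shift test (objective: simpler); both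
-- sort c1/c2 in place in Python (c1.sort()/c2.sort()) — the equivalence proved here is about the
-- return value; B performs the same in-place mutation as A.

-- ===== PORT A =====
-- shared preprocessing (identical lines in A and B): sort, then wrap-around difference list
-- diff = [(c[i+1] - c[i] + M) % M for i in range(-1, N-1)]  (Python negative index / % via PySem)
def pvDiffs (N : Int) (c : List Int) : List Int :=
  let s := PySem.List.sorted c (fun x => x) false
  (PySem.List.pyRange (-1) (N - 1) 1).map (fun i =>
    PySem.Int.mod (PySem.List.pyGetD s (i + 1) 0 - PySem.List.pyGetD s i 0 + 360000) 360000)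

-- while j > 0 and x != P[j]: j = lps[j-1]   (fuel = initial j suffices: j strictly decreases)
def pvFall (P : List Int) (lps : List Nat) (x : Int) : Nat → Nat → Nat
  | 0, j => j
  | f + 1, j => if 0 < j ∧ x ≠ P.getD j 0 then pvFall P lps x f (lps.getD (j - 1) 0) else j

-- compute_lps(P), j and the lps entries are the nonnegative Python ints, kept as Nat
def pvComputeLps (P : List Int) : List Nat :=
  ((List.range' 1 (P.length - 1)).foldl (fun st i =>
      let j := pvFall P st.2 (P.getD i 0) st.1 st.1
      if P.getD i 0 = P.getD j 0 then (j + 1, st.2.set i (j + 1)) else (j, st.2))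
    (0, List.replicate P.length 0)).2

-- the KMP scan over T with early return on j == lengthP
def pvKmpLoop (P : List Int) (lps : List Nat) : List Int → Nat → Bool
  | [], _ => false
  | x :: rest, j =>
    let j1 := pvFall P lps x j j
    let j2 := if x = P.getD j1 0 then j1 + 1 else j1
    if j2 = P.length then true else pvKmpLoop P lps rest j2

def get_possibility (N : Int) (c1 : List Int) (c2 : List Int) : String :=
  let diff1 := pvDiffs N c1
  let diff2 := pvDiffs N c2
  let T := diff1 ++ diff1
  let P := diff2
  let lps := pvComputeLps P
  if pvKmpLoop P lps T 0 then "possible" else "impossible"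

-- ===== PORT B =====
-- for s in range(N): if all(diff2[i] == diff1[(i+s) % N] for i in range(N)): return "possible"
def get_possibility_alt (N : Int) (c1 : List Int) (c2 : List Int) : String :=
  let diff1 := pvDiffs N c1
  let diff2 := pvDiffs N c2
  if (List.range N.toNat).any (fun s =>
       (List.range N.toNat).all (fun i =>
         diff2.getD i 0 == diff1.getD ((i + s) % N.toNat) 0))
  then "possible" else "impossible"

-- ===== PRECONDITION & SPEC =====
-- Python A raises IndexError iff N exceeds a list length (the comprehension reads c[N-1] and c[-1])
def Pre_get_possibility (N : Int) (c1 : List Int) (c2 : List Int) : Prop :=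
  N ≤ (c1.length : Int) ∧ N ≤ (c2.length : Int)
instance (N : Int) (c1 : List Int) (c2 : List Int) : Decidable (Pre_get_possibility N c1 c2) := by
  unfold Pre_get_possibility; infer_instance

def pvWitness_get_possibility : Int × List Int × List Int := (3, [10, 0, 300000], [20, 10, 300010])

def Spec_get_possibility (N : Int) (c1 : List Int) (c2 : List Int) (out : String) : Prop := out = get_possibility_alt N c1 c2
instance (N : Int) (c1 : List Int) (c2 : List Int) (out : String) : Decidable (Spec_get_possibility N c1 c2 out) := by unfold Spec_get_possibility; infer_instance

-- ===== CLAIM (what is proved, stated in full; the proofs are below) =====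
def Claim_equal_get_possibility : Prop := ∀ (N : Int) (c1 : List Int) (c2 : List Int), Dom_get_possibility N c1 c2 → Pre_get_possibility N c1 c2 → Spec_get_possibility N c1 c2 (get_possibility N c1 c2)

-- ===== LEMMAS AND PROOFS =====

def pvMaxpre (P Q : List Int) : Nat :=
  Nat.findGreatest (fun j => P.take j <:+ Q) P.length
theorem pvMaxpre_suffix (P Q : List Int) : P.take (pvMaxpre P Q) <:+ Q :=
  Nat.findGreatest_spec (P := fun j => P.take j <:+ Q) (Nat.zero_le P.length) (by simp)
theorem pvMaxpre_le (P Q : List Int) : pvMaxpre P Q ≤ P.length := Nat.findGreatest_le _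
theorem pvMaxpre_is_greatest (P Q : List Int) {t : Nat} (ht : t ≤ P.length)
    (hs : P.take t <:+ Q) : t ≤ pvMaxpre P Q := by
  by_contra h
  rw [pvMaxpre] at h
  have h2 : Nat.findGreatest (fun j => P.take j <:+ Q) P.length < t := by omega
  exact Nat.findGreatest_is_greatest h2 ht hs
theorem pvMaxpre_le_len (P Q : List Int) : pvMaxpre P Q ≤ Q.length := by
  have h := (pvMaxpre_suffix P Q).length_le
  have h2 : pvMaxpre P Q ≤ P.length := Nat.findGreatest_le _
  simp [List.length_take] at h
  omega
theorem pvSuffix_of_suffix_of_length_le {l1 l2 Q : List Int}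
    (h1 : l1 <:+ Q) (h2 : l2 <:+ Q) (h : l1.length ≤ l2.length) : l1 <:+ l2 := by
  obtain ⟨u1, hu1⟩ := h1
  obtain ⟨u2, hu2⟩ := h2
  have hl : u2.length ≤ u1.length := by
    have e1 := congrArg List.length hu1
    have e2 := congrArg List.length hu2
    simp [List.length_append] at e1 e2
    omega
  have hd1 : Q.drop u1.length = l1 := by rw [← hu1, List.drop_left]
  have hd2 : Q.drop u1.length = l2.drop (u1.length - u2.length) := by
    rw [← hu2, List.drop_append, List.drop_eq_nil_of_le hl, List.nil_append]
  rw [← hd1, hd2]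
  exact List.drop_suffix _ _
theorem pvMaxpre_nil {P : List Int} (hP : P ≠ []) : pvMaxpre P [] = 0 := by
  rw [pvMaxpre, Nat.findGreatest_eq_zero_iff]
  intro n hn hnb hs
  rw [List.suffix_nil] at hs
  have hlen := congrArg List.length hs
  have hp : 0 < P.length := List.length_pos_of_ne_nil hP
  have h0 : min n P.length = 0 := by simpa [List.length_take] using hlen
  rw [Nat.min_eq_zero_iff] at h0
  omega
theorem pvTake_succ_concat (P : List Int) {t : Nat} (ht : t < P.length) :
    P.take (t + 1) = P.take t ++ [P.getD t 0] := by
  rw [List.take_succ, List.getElem?_eq_getElem ht, List.getD_eq_getElem _ _ ht]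
  rfl
theorem pvF3 {P Q : List Int} {t : Nat} {x : Int} (ht : t < P.length)
    (hs : P.take t <:+ Q) (hx : P.getD t 0 = x) : P.take (t + 1) <:+ Q ++ [x] := by
  obtain ⟨u, hu⟩ := hs
  exact ⟨u, by rw [pvTake_succ_concat P ht, hx, ← List.append_assoc, hu]⟩
theorem pvF2 {P Q : List Int} {t : Nat} {x : Int} (ht1 : 1 ≤ t) (ht : t ≤ P.length)
    (hs : P.take t <:+ Q ++ [x]) : P.take (t - 1) <:+ Q ∧ P.getD (t - 1) 0 = x := by
  obtain ⟨u, hu⟩ := hs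
  rw [show t = (t - 1) + 1 by omega, pvTake_succ_concat P (by omega)] at hu
  rw [← List.append_assoc] at hu
  have := List.append_inj' hu (by simp)
  obtain ⟨h1, h2⟩ := this
  exact ⟨⟨u, h1⟩, by simpa using h2⟩
theorem pvSuffix_drop_one {l m : List Int} (h : l <:+ m) (hl : l.length < m.length) :
    l <:+ m.drop 1 := by
  obtain ⟨u, hu⟩ := h
  have hu1 : 1 ≤ u.length := by
    have := congrArg List.length hu
    simp [List.length_append] at this
    omega
  exact ⟨u.drop 1, by rw [← List.drop_append_of_le_length hu1, hu]⟩
def pvBord (P : List Int) (k : Nat) : Nat :=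
  Nat.findGreatest (fun t => P.take t <:+ P.take (k + 1)) k
theorem pvBord_le (P : List Int) (k : Nat) : pvBord P k ≤ k := Nat.findGreatest_le _
theorem pvBord_suffix (P : List Int) (k : Nat) : P.take (pvBord P k) <:+ P.take (k + 1) :=
  Nat.findGreatest_spec (P := fun t => P.take t <:+ P.take (k + 1)) (Nat.zero_le k) (by simp)
theorem pvBord_is_greatest (P : List Int) {k t : Nat} (ht : t ≤ k)
    (hs : P.take t <:+ P.take (k + 1)) : t ≤ pvBord P k := by
  by_contra h
  rw [pvBord] at h
  have h2 : Nat.findGreatest (fun t => P.take t <:+ P.take (k + 1)) k < t := by omega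
  exact Nat.findGreatest_is_greatest h2 ht hs
theorem pvBord_eq_maxpre (P : List Int) {k : Nat} (hk : k < P.length) :
    pvBord P k = pvMaxpre P ((P.take (k + 1)).drop 1) := by
  have hlenQ : ((P.take (k + 1)).drop 1).length = k := by
    simp [List.length_drop, List.length_take]; omega
  apply Nat.le_antisymm
  · rcases Nat.eq_zero_or_pos (pvBord P k) with h0 | hpos
    · omega
    · apply pvMaxpre_is_greatest P _ (by have := pvBord_le P k; omega)
      apply pvSuffix_drop_one (pvBord_suffix P k)
      have hb := pvBord_le P k
      simp [List.length_take]
      omega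
  · have hm := pvMaxpre_le_len P ((P.take (k + 1)).drop 1)
    rw [hlenQ] at hm
    apply pvBord_is_greatest P hm
    exact (pvMaxpre_suffix P _).trans (List.drop_suffix _ _)
-- the fall loop
theorem pvChain (P : List Int) (lps : List Nat) (x : Int) (j0 : Nat) (Q : List Int)
    (Hlps : ∀ k, k < j0 → lps.getD k 0 = pvBord P k) (hj0 : j0 < P.length) :
    ∀ f c, c ≤ f → c ≤ j0 → P.take c <:+ Q →
      (∀ t, t ≤ P.length → P.take t <:+ Q → c < t → x ≠ P.getD t 0) →
      (pvFall P lps x f c ≤ c ∧ P.take (pvFall P lps x f c) <:+ Q ∧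
       (∀ t, t ≤ P.length → P.take t <:+ Q → pvFall P lps x f c < t → x ≠ P.getD t 0) ∧
       (x = P.getD (pvFall P lps x f c) 0 ∨ pvFall P lps x f c = 0)) := by
  intro f
  induction f with
  | zero =>
    intro c hcf hcj hsuf hinv
    have hc0 : c = 0 := by omega
    subst hc0
    refine ⟨le_refl _, hsuf, hinv, Or.inr rfl⟩
  | succ f ih =>
    intro c hcf hcj hsuf hinv
    by_cases hcond : 0 < c ∧ x ≠ P.getD c 0
    · have hstep : pvFall P lps x (f + 1) c = pvFall P lps x f (lps.getD (c - 1) 0) := by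
        show (if 0 < c ∧ x ≠ P.getD c 0 then pvFall P lps x f (lps.getD (c - 1) 0) else c) = _
        rw [if_pos hcond]
      have hc1 : c - 1 < j0 := by omega
      have hc' : lps.getD (c - 1) 0 = pvBord P (c - 1) := Hlps _ hc1
      have hble : pvBord P (c - 1) ≤ c - 1 := pvBord_le P (c - 1)
      have hctake : c - 1 + 1 = c := by omega
      have hsufc' : P.take (pvBord P (c - 1)) <:+ Q := by
        have := pvBord_suffix P (c - 1)
        rw [hctake] at this
        exact this.trans hsuf
      have hinv' : ∀ t, t ≤ P.length → P.take t <:+ Q → pvBord P (c - 1) < t → x ≠ P.getD t 0 := by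
        intro t htP htQ htgt
        rcases Nat.lt_trichotomy t c with hlt | heq | hgt
        · -- t < c : t is a border of P.take c, so t ≤ pvBord (c-1) : contradiction
          exfalso
          have h1 : P.take t <:+ P.take c := by
            apply pvSuffix_of_suffix_of_length_le htQ hsuf
            simp [List.length_take]; omega
          rw [← hctake] at h1
          have := pvBord_is_greatest P (by omega) h1
          omega
        · subst heq; exact hcond.2
        · exact hinv t htP htQ hgt
      rw [hstep, hc']
      obtain ⟨h1, h2, h3, h4⟩ := ih _ (by omega) (by omega) hsufc' hinv'
      exact ⟨le_trans h1 (by omega), h2, h3, h4⟩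
    · have hstep : pvFall P lps x (f + 1) c = c := by
        show (if 0 < c ∧ x ≠ P.getD c 0 then pvFall P lps x f (lps.getD (c - 1) 0) else c) = c
        rw [if_neg hcond]
      rw [hstep]
      refine ⟨le_refl _, hsuf, hinv, ?_⟩
      by_cases hc0 : c = 0
      · exact Or.inr hc0
      · left
        by_contra hne
        exact hcond ⟨by omega, hne⟩
theorem pvExt (P : List Int) (lps : List Nat) (Q : List Int) (x : Int)
    (Hlps : ∀ k, k < pvMaxpre P Q → lps.getD k 0 = pvBord P k)
    (hj0 : pvMaxpre P Q < P.length) :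
    pvMaxpre P (Q ++ [x]) =
      (if x = P.getD (pvFall P lps x (pvMaxpre P Q) (pvMaxpre P Q)) 0
       then pvFall P lps x (pvMaxpre P Q) (pvMaxpre P Q) + 1
       else pvFall P lps x (pvMaxpre P Q) (pvMaxpre P Q)) ∧
    (x ≠ P.getD (pvFall P lps x (pvMaxpre P Q) (pvMaxpre P Q)) 0 →
       pvFall P lps x (pvMaxpre P Q) (pvMaxpre P Q) = 0) := by
  have hpost := pvChain P lps x (pvMaxpre P Q) Q Hlps hj0 (pvMaxpre P Q) (pvMaxpre P Q)
    (le_refl _) (le_refl _) (pvMaxpre_suffix P Q)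
    (fun t htP htQ htgt => by
      exfalso
      have := pvMaxpre_is_greatest P Q htP htQ
      omega)
  obtain ⟨hle, hsuf, hinv, hlast⟩ := hpost
  set r := pvFall P lps x (pvMaxpre P Q) (pvMaxpre P Q) with hr
  have hr0 : x ≠ P.getD r 0 → r = 0 := by
    intro hne
    rcases hlast with h | h
    · exact absurd h hne
    · exact h
  refine ⟨?_, hr0⟩
  by_cases hx : x = P.getD r 0
  · rw [if_pos hx]
    rw [pvMaxpre, Nat.findGreatest_eq_iff]
    refine ⟨by omega, fun _ => pvF3 (by omega) hsuf hx.symm, ?_⟩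
    intro n hn hnb hsn
    have h2 := pvF2 (by omega) hnb hsn
    exact hinv (n - 1) (by omega) h2.1 (by omega) h2.2.symm
  · rw [if_neg hx]
    have hr00 := hr0 hx
    rw [hr00]
    rw [pvMaxpre, Nat.findGreatest_eq_iff]
    refine ⟨by omega, by omega, ?_⟩
    intro n hn hnb hsn
    have h2 := pvF2 (by omega) hnb hsn
    rcases Nat.eq_or_lt_of_le (show 1 ≤ n by omega) with h1 | h1
    · apply hx
      rw [hr00]
      rw [← h1.symm] at h2
      simpa using h2.2.symm
    · exact hinv (n - 1) (by omega) h2.1 (by omega) h2.2.symm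

theorem pvGetD_set (l : List Nat) (i j v d : Nat) :
    (l.set i v).getD j d = if i = j ∧ i < l.length then v else l.getD j d := by
  by_cases hij : i = j
  · subst hij
    by_cases hi : i < l.length
    · simp [List.getD, List.getElem?_set, hi]
    · simp [List.getD, List.getElem?_set, hi, List.getElem?_eq_none (le_of_not_gt hi)]
  · simp [List.getD, List.getElem?_set, hij]

def pvStep (P : List Int) (st : Nat × List Nat) (i : Nat) : Nat × List Nat :=
  let j := pvFall P st.2 (P.getD i 0) st.1 st.1
  if P.getD i 0 = P.getD j 0 then (j + 1, st.2.set i (j + 1)) else (j, st.2)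

def pvInv (P : List Int) (i : Nat) (st : Nat × List Nat) : Prop :=
  st.1 = pvMaxpre P ((P.take i).drop 1) ∧ st.2.length = P.length ∧
  (∀ k, k < i → st.2.getD k 0 = pvBord P k) ∧ (∀ k, i ≤ k → st.2.getD k 0 = 0)

theorem pvStep_inv (P : List Int) (i : Nat) (st : Nat × List Nat)
    (hi1 : 1 ≤ i) (hi : i < P.length) (h : pvInv P i st) :
    pvInv P (i + 1) (pvStep P st i) := by
  obtain ⟨hj, hlen, hcorr, hzero⟩ := h
  have hQlen : ((P.take i).drop 1).length = i - 1 := by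
    simp [List.length_take]; omega
  have hj0le : st.1 ≤ i - 1 := by
    rw [hj]
    have := pvMaxpre_le_len P ((P.take i).drop 1)
    omega
  have hj0lt : st.1 < P.length := by omega
  have Hlps : ∀ k, k < pvMaxpre P ((P.take i).drop 1) → st.2.getD k 0 = pvBord P k := by
    intro k hk
    exact hcorr k (by omega)
  have hExt := pvExt P st.2 ((P.take i).drop 1) (P.getD i 0) Hlps (hj ▸ hj0lt)
  have hQext : (P.take i).drop 1 ++ [P.getD i 0] = (P.take (i + 1)).drop 1 := by
    rw [pvTake_succ_concat P hi, List.drop_append_of_le_length (by simp [List.length_take]; omega)]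
  rw [hQext] at hExt
  have hrr : pvFall P st.2 (P.getD i 0) (pvMaxpre P ((P.take i).drop 1)) (pvMaxpre P ((P.take i).drop 1))
      = pvFall P st.2 (P.getD i 0) st.1 st.1 := by rw [← hj]
  rw [hrr] at hExt
  set x := P.getD i 0 with hx
  set r := pvFall P st.2 x st.1 st.1 with hr
  have hble : r ≤ st.1 := by
    have := pvChain P st.2 x st.1 ((P.take i).drop 1) (hj ▸ Hlps) hj0lt st.1 st.1
      (le_refl _) (le_refl _) (hj ▸ pvMaxpre_suffix P _)
      (fun t htP htQ htgt => by
        exfalso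
        have := pvMaxpre_is_greatest P ((P.take i).drop 1) htP htQ
        omega)
    exact this.1
  have hbordi : pvBord P i = pvMaxpre P ((P.take (i + 1)).drop 1) := pvBord_eq_maxpre P hi
  unfold pvStep pvInv
  by_cases hmatch : x = P.getD r 0
  · rw [← hr, if_pos hmatch]
    refine ⟨by rw [hExt.1, if_pos hmatch], by simp [hlen], ?_, ?_⟩
    · intro k hk
      rcases Nat.lt_or_ge k i with hki | hki
      · simp only [pvGetD_set]
        rw [if_neg (by omega)]
        exact hcorr k hki
      · have hki' : k = i := by omega
        subst hki'
        simp only [pvGetD_set]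
        split_ifs with hcase
        · rw [hbordi, hExt.1, if_pos hmatch]
        · exact absurd ⟨by trivial, by omega⟩ hcase
    · intro k hk
      simp only [pvGetD_set]
      rw [if_neg (by omega)]
      exact hzero k (by omega)
  · rw [← hr, if_neg hmatch]
    have hr0 : r = 0 := hExt.2 hmatch
    refine ⟨by rw [hExt.1, if_neg hmatch], hlen, ?_, ?_⟩
    · intro k hk
      rcases Nat.lt_or_ge k i with hki | hki
      · exact hcorr k hki
      · have hki' : k = i := by omega
        subst hki'
        rw [hzero k (le_refl _), hbordi, hExt.1, if_neg hmatch, hr0]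
    · intro k hk
      exact hzero k (by omega)

theorem pvFold_inv (P : List Int) :
    ∀ m i st, 1 ≤ i → i + m = P.length → pvInv P i st →
      pvInv P P.length ((List.range' i m).foldl (pvStep P) st) := by
  intro m
  induction m with
  | zero =>
    intro i st h1 h2 h3
    simpa [← h2] using h3
  | succ m ih =>
    intro i st h1 h2 h3
    rw [List.range'_succ, List.foldl_cons]
    exact ih (i + 1) _ (by omega) (by omega) (pvStep_inv P i st h1 (by omega) h3)

theorem pvComputeLps_correct (P : List Int) :
    ∀ k, k < P.length → (pvComputeLps P).getD k 0 = pvBord P k := by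
  intro k hk
  have hP : P ≠ [] := by
    intro h; subst h; simp at hk
  have hP1 : 1 ≤ P.length := List.length_pos_of_ne_nil hP
  have hinit : pvInv P 1 (0, List.replicate P.length 0) := by
    refine ⟨?_, by simp, ?_, ?_⟩
    · have h1 : (P.take 1).drop 1 = [] := by
        rw [List.drop_eq_nil_of_le]
        simp [List.length_take]
      rw [h1, pvMaxpre_nil hP]
    · intro k hk1
      have hk0 : k = 0 := by omega
      subst hk0
      show (List.replicate P.length (0:Nat)).getD 0 0 = pvBord P 0
      have hb : pvBord P 0 = 0 := rfl
      rw [hb, List.getD, List.getElem?_replicate]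
      split_ifs <;> rfl
    · intro k _
      show (List.replicate P.length (0:Nat)).getD k 0 = 0
      rw [List.getD, List.getElem?_replicate]
      split_ifs <;> rfl
  have heq : pvComputeLps P = ((List.range' 1 (P.length - 1)).foldl (pvStep P) (0, List.replicate P.length 0)).2 := rfl
  have := pvFold_inv P (P.length - 1) 1 (0, List.replicate P.length 0) (le_refl _) (by omega) hinit
  rw [heq]
  exact this.2.2.1 k hk

theorem pvKmpLoop_iff (P : List Int) (lps : List Nat) (hP : P ≠ [])
    (Hlps : ∀ k, k < P.length → lps.getD k 0 = pvBord P k) :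
    ∀ rest Q j, j = pvMaxpre P Q → j < P.length →
      (pvKmpLoop P lps rest j = true ↔
        ∃ k, 1 ≤ k ∧ k ≤ rest.length ∧ P <:+ Q ++ rest.take k) := by
  intro rest
  induction rest with
  | nil =>
    intro Q j hj hjlt
    constructor
    · intro h
      exact absurd h (by simp [pvKmpLoop])
    · rintro ⟨k, h1, h2, h3⟩
      simp at h2
      omega
  | cons x rest ih =>
    intro Q j hj hjlt
    have Hlps' : ∀ k, k < pvMaxpre P Q → lps.getD k 0 = pvBord P k := by
      intro k hk
      exact Hlps k (by omega)
    have hExt := pvExt P lps Q x Hlps' (hj ▸ hjlt)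
    rw [← hj] at hExt
    set r := pvFall P lps x j j with hr
    set j2 := if x = P.getD r 0 then r + 1 else r with hj2
    have hunf : pvKmpLoop P lps (x :: rest) j
        = if j2 = P.length then true else pvKmpLoop P lps rest j2 := rfl
    have hm : pvMaxpre P (Q ++ [x]) = j2 := hExt.1
    by_cases hfin : j2 = P.length
    · rw [hunf, if_pos hfin]
      simp only [true_iff]
      refine ⟨1, le_refl _, by simp, ?_⟩
      have hsuf := pvMaxpre_suffix P (Q ++ [x])
      rw [hm, hfin, List.take_length] at hsuf
      simpa using hsuf
    · rw [hunf, if_neg hfin]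
      have hj2le : j2 ≤ P.length := hm ▸ pvMaxpre_le P (Q ++ [x])
      have hj2lt : j2 < P.length := by omega
      rw [ih (Q ++ [x]) j2 hm.symm hj2lt]
      constructor
      · rintro ⟨k', h1, h2, h3⟩
        refine ⟨k' + 1, by omega, by simp; omega, ?_⟩
        rw [List.take_succ_cons]
        simpa [List.append_assoc] using h3
      · rintro ⟨k, h1, h2, h3⟩
        have hk : k = (k - 1) + 1 := by omega
        rw [hk, List.take_succ_cons] at h3
        rcases Nat.eq_zero_or_pos (k - 1) with h0 | hpos
        · exfalso
          rw [h0] at h3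
          simp at h3
          have : P.length ≤ pvMaxpre P (Q ++ [x]) := by
            apply pvMaxpre_is_greatest P (Q ++ [x]) (le_refl _)
            rw [List.take_length]
            exact h3
          omega
        · refine ⟨k - 1, hpos, by simp at h2; omega, ?_⟩
          simpa [List.append_assoc] using h3

theorem pvKmp_correct (P T : List Int) (hP : P ≠ []) :
    (pvKmpLoop P (pvComputeLps P) T 0 = true ↔
      ∃ k, 1 ≤ k ∧ k ≤ T.length ∧ P <:+ T.take k) := by
  have h := pvKmpLoop_iff P (pvComputeLps P) hP (pvComputeLps_correct P) T [] 0
    (pvMaxpre_nil hP).symm (List.length_pos_of_ne_nil hP)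
  simpa using h
theorem pvTget (D1 : List Int) (n : Nat) (h1 : D1.length = n) {s i : Nat}
    (hs : s ≤ n) (hi : i < n) :
    (D1 ++ D1).getD (s + i) 0 = D1.getD ((i + s) % n) 0 := by
  rcases Nat.lt_or_ge (s + i) n with h | h
  · rw [List.getD, List.getD, List.getElem?_append, if_pos (by omega),
      Nat.mod_eq_of_lt (by omega), Nat.add_comm i s]
  · rw [List.getD, List.getD, List.getElem?_append_right (by omega),
      Nat.mod_eq_sub_mod (by omega), Nat.mod_eq_of_lt (by omega), h1,
      show i + s - n = s + i - n by omega]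

theorem pvShift (D1 D2 : List Int) (n : Nat) (h1 : D1.length = n) (h2 : D2.length = n)
    (hn : 1 ≤ n) {s : Nat} (hs : s ≤ n) :
    (D2 <:+ (D1 ++ D1).take (s + n) ↔
      ∀ i, i < n → D2.getD i 0 = D1.getD ((i + s) % n) 0) := by
  have hT : (D1 ++ D1).length = 2 * n := by simp [h1]; omega
  have htl : (((D1 ++ D1).drop s).take n).length = n := by
    simp [List.length_take, List.length_drop, hT]
    omega
  have hpoint : ∀ i, i < n → (((D1 ++ D1).drop s).take n).getD i 0 = D1.getD ((i + s) % n) 0 := by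
    intro i hi
    rw [List.getD, List.getElem?_take, if_pos hi, List.getElem?_drop, ← List.getD]
    exact pvTget D1 n h1 hs hi
  have hsplit : (D1 ++ D1).take (s + n) = (D1 ++ D1).take s ++ ((D1 ++ D1).drop s).take n :=
    List.take_add
  constructor
  · intro hsuf
    obtain ⟨u, hu⟩ := hsuf
    rw [hsplit] at hu
    have hinj := List.append_inj' hu (by rw [h2, htl])
    intro i hi
    rw [hinj.2]
    exact hpoint i hi
  · intro hpt
    have hD2 : D2 = ((D1 ++ D1).drop s).take n := by
      apply List.ext_getElem (by rw [h2, htl])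
      intro i hi1 hi2
      have hin : i < n := by omega
      have e1 := List.getD_eq_getElem D2 0 hi1
      have e2 := List.getD_eq_getElem (((D1 ++ D1).drop s).take n) 0 hi2
      rw [← e1, ← e2, hpt i hin, hpoint i hin]
    exact ⟨(D1 ++ D1).take s, by rw [hD2, hsplit]⟩

theorem pvRot (D1 D2 : List Int) (n : Nat) (h1 : D1.length = n) (h2 : D2.length = n)
    (hn : 1 ≤ n) :
    ((∃ k, 1 ≤ k ∧ k ≤ (D1 ++ D1).length ∧ D2 <:+ (D1 ++ D1).take k) ↔
      (∃ s, s < n ∧ ∀ i, i < n → D2.getD i 0 = D1.getD ((i + s) % n) 0)) := by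
  have hT : (D1 ++ D1).length = 2 * n := by simp [h1]; omega
  constructor
  · rintro ⟨k, hk1, hk2, hsuf⟩
    have hklen : n ≤ k := by
      have := hsuf.length_le
      simp [List.length_take, h2] at this
      omega
    have hs0 : k - n ≤ n := by omega
    have hsuf' : D2 <:+ (D1 ++ D1).take ((k - n) + n) := by
      rw [show (k - n) + n = k by omega]
      exact hsuf
    have hpt := (pvShift D1 D2 n h1 h2 hn hs0).mp hsuf'
    rcases Nat.lt_or_ge (k - n) n with h | h
    · exact ⟨k - n, h, hpt⟩
    · have hs0n : k - n = n := by omega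
      refine ⟨0, by omega, ?_⟩
      intro i hi
      have hp := hpt i hi
      rw [hs0n, Nat.add_mod_right, Nat.mod_eq_of_lt hi] at hp
      rw [hp, Nat.add_zero, Nat.mod_eq_of_lt hi]
  · rintro ⟨s, hs, hpt⟩
    exact ⟨s + n, by omega, by rw [hT]; omega,
      (pvShift D1 D2 n h1 h2 hn (le_of_lt hs)).mpr hpt⟩


theorem pvDiffs_length (N : Int) (c : List Int) : (pvDiffs N c).length = N.toNat := by
  simp [pvDiffs, PySem.List.length_pyRange_one]

theorem pvMain (N : Int) (c1 c2 : List Int) :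
    get_possibility N c1 c2 = get_possibility_alt N c1 c2 := by
  simp only [get_possibility, get_possibility_alt]
  have h1 : (pvDiffs N c1).length = N.toNat := pvDiffs_length N c1
  have h2 : (pvDiffs N c2).length = N.toNat := pvDiffs_length N c2
  rcases Nat.eq_zero_or_pos N.toNat with hn | hn
  · have hD1 : pvDiffs N c1 = [] := List.eq_nil_of_length_eq_zero (h1.trans hn)
    have hD2 : pvDiffs N c2 = [] := List.eq_nil_of_length_eq_zero (h2.trans hn)
    rw [hD1, hD2, hn]
    simp [pvKmpLoop]
  · have hP : pvDiffs N c2 ≠ [] := by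
      intro h
      rw [h] at h2
      simp at h2
      omega
    have hbool : pvKmpLoop (pvDiffs N c2) (pvComputeLps (pvDiffs N c2)) (pvDiffs N c1 ++ pvDiffs N c1) 0
        = ((List.range N.toNat).any fun s =>
            (List.range N.toNat).all fun i =>
              (pvDiffs N c2).getD i 0 == (pvDiffs N c1).getD ((i + s) % N.toNat) 0) := by
      apply Bool.eq_iff_iff.mpr
      rw [pvKmp_correct (pvDiffs N c2) (pvDiffs N c1 ++ pvDiffs N c1) hP,
        pvRot (pvDiffs N c1) (pvDiffs N c2) N.toNat h1 h2 hn, List.any_eq_true]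
      constructor
      · rintro ⟨s, hs, hpt⟩
        refine ⟨s, List.mem_range.mpr hs, ?_⟩
        rw [List.all_eq_true]
        intro i hi
        exact beq_iff_eq.mpr (hpt i (List.mem_range.mp hi))
      · rintro ⟨s, hs, hall⟩
        refine ⟨s, List.mem_range.mp hs, ?_⟩
        intro i hi
        rw [List.all_eq_true] at hall
        exact beq_iff_eq.mp (hall i (List.mem_range.mpr hi))
    rw [hbool]

-- ===== VERDICT (by name: the statement is the Claim_ definition above) =====
theorem get_possibility_spec : Claim_equal_get_possibility := by
  intro N c1 c2 _ _
  show get_possibility N c1 c2 = get_possibility_alt N c1 c2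
  exact pvMain N c1 c2
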